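-- pv_equiv track=rewrite | github.com/shandrayu/aoc-2020 | day06/python/day06.py | count_everyone_answered_yes
-- ===== SOURCE A (Python) =====
-- from typing import List
--
-- def count_everyone_answered_yes(lines: List[str]) -> int:
--     counts = []
--     current_questions = set()
--     is_first_person = True
--     for line in lines:
--         if line == '\n':
--             counts.append(len(current_questions))
--             current_questions = set()
--             is_first_person = True
--         else:
--             line = line.strip('\n')
--             answers = set(line)
--             if is_first_person:
--                 current_questions = answers
--                 is_first_person = False
--             else:
--                 current_questions = current_questions.intersection(answers)
--     # last set of questions
--     counts.append(len(current_questions))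
--     return sum(counts)
-- ===== SOURCE B (Python) =====
-- from typing import List
--
-- def count_everyone_answered_yes(lines: List[str]) -> int:
--     # Phase 1: partition into groups of stripped lines, blank line '\n' ends a group.
--     groups = []
--     current = []
--     for line in lines:
--         if line == '\n':
--             groups.append(current)
--             current = []
--         else:
--             current.append(line.strip('\n'))
--     groups.append(current)
--     # Phase 2: per group, intersect everyone's answer sets; empty group counts 0.
--     return sum(len(set(g[0]).intersection(*g[1:])) if g else 0 for g in groups)
-- ===== Notes on version B (the rewrite author's own statement) =====
-- stated objective: alternative
-- what changed: Replaces A's single-pass is_first_person state machine with a two-phase decomposition: first partition the lines into groups (blank line closes a group), then sum len(set(g[0]).intersection(*g[1:])) per group, 0 for empty groups.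
import Mathlib
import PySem

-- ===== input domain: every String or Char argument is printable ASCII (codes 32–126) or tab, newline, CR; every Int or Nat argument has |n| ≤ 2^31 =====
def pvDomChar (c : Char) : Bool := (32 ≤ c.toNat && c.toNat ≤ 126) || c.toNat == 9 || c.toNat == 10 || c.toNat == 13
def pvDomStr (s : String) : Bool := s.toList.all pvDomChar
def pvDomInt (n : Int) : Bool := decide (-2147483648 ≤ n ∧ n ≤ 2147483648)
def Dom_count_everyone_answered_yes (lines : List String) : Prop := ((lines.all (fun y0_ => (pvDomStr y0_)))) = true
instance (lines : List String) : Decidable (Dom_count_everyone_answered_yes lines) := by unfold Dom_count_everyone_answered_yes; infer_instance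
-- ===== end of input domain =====

-- B replaces A's inline is_first_person state machine by a two-phase decomposition
-- (partition into groups, then intersect each group with set.intersection(*rest)); same cost, clearer structure.

-- ===== PORT A =====
-- state: (counts, current_questions, is_first_person)
def count_everyone_answered_yes (lines : List String) : Int :=
  let st := lines.foldl
    (fun (st : List Int × PySem.Set Char × Bool) line =>
      if line == "\n" then
        (st.1 ++ [((st.2.1).length : Int)], PySem.Set.empty, true)
      else
        let line' := PySem.Str.stripChars line "\n"
        let answers := PySem.Set.ofList line'.toList
        if st.2.2 then (st.1, answers, false)
        else (st.1, PySem.Set.inter st.2.1 answers, false))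
    ([], PySem.Set.empty, true)
  (st.1 ++ [((st.2.1).length : Int)]).sum

-- ===== PORT B =====
-- len(set(g[0]).intersection(*g[1:])) if g else 0 : a left fold of '&' over the remaining lines
def pvGroupCount (g : List String) : Int :=
  match g with
  | [] => 0
  | h :: t => ((t.foldl (fun s x => PySem.Set.inter s x.toList) (PySem.Set.ofList h.toList)).length : Int)

def count_everyone_answered_yes_alt (lines : List String) : Int :=
  -- phase 1: partition into groups of stripped lines; '\n' closes a group
  let p := lines.foldl
    (fun (p : List (List String) × List String) line =>
      if line == "\n" then (p.1 ++ [p.2], [])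
      else (p.1, p.2 ++ [PySem.Str.stripChars line "\n"]))
    ([], [])
  -- phase 2: sum of per-group intersection sizes
  ((p.1 ++ [p.2]).map pvGroupCount).sum

-- ===== PRECONDITION & SPEC =====
def Spec_count_everyone_answered_yes (lines : List String) (out : Int) : Prop := out = count_everyone_answered_yes_alt lines
instance (lines : List String) (out : Int) : Decidable (Spec_count_everyone_answered_yes lines out) := by unfold Spec_count_everyone_answered_yes; infer_instance

-- ===== CLAIM (what is proved, stated in full; the proofs are below) =====
def Claim_equal_count_everyone_answered_yes : Prop := ∀ (lines : List String), Dom_count_everyone_answered_yes lines → Spec_count_everyone_answered_yes lines (count_everyone_answered_yes lines)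

-- ===== LEMMAS AND PROOFS =====

-- the running intersection of a group, as A maintains it
def pvInterOf : List String → PySem.Set Char
  | [] => PySem.Set.empty
  | h :: t => t.foldl (fun s x => PySem.Set.inter s x.toList) (PySem.Set.ofList h.toList)

lemma pvGroupCount_eq (g : List String) : pvGroupCount g = ((pvInterOf g).length : Int) := by
  cases g <;> rfl

lemma pvInter_ofList (s : PySem.Set Char) (t : List Char) :
    PySem.Set.inter s (PySem.Set.ofList t) = PySem.Set.inter s t := by
  unfold PySem.Set.inter
  apply List.filter_congr
  intro x _
  simp [PySem.Set.mem_ofList]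

lemma pvInterOf_append (h : String) (t : List String) (l : String) :
    pvInterOf ((h :: t) ++ [l]) = PySem.Set.inter (pvInterOf (h :: t)) l.toList := by
  simp [pvInterOf, List.foldl_append]

lemma pv_key : ∀ (lines : List String) (counts : List Int) (groups : List (List String)) (cur : List String),
    counts.sum = (groups.map pvGroupCount).sum →
    (let st := lines.foldl
        (fun (st : List Int × PySem.Set Char × Bool) line =>
          if line == "\n" then
            (st.1 ++ [((st.2.1).length : Int)], PySem.Set.empty, true)
          else
            let line' := PySem.Str.stripChars line "\n"
            let answers := PySem.Set.ofList line'.toList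
            if st.2.2 then (st.1, answers, false)
            else (st.1, PySem.Set.inter st.2.1 answers, false))
        (counts, pvInterOf cur, cur.isEmpty) ;
      (st.1 ++ [((st.2.1).length : Int)]).sum)
    =
    (let p := lines.foldl
        (fun (p : List (List String) × List String) line =>
          if line == "\n" then (p.1 ++ [p.2], [])
          else (p.1, p.2 ++ [PySem.Str.stripChars line "\n"]))
        (groups, cur) ;
      ((p.1 ++ [p.2]).map pvGroupCount).sum) := by
  intro lines
  induction lines with
  | nil =>
      intro counts groups cur h
      simp [List.sum_append, h, pvGroupCount_eq]
  | cons l rest ih =>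
      intro counts groups cur h
      simp only [List.foldl_cons]
      by_cases hl : l == "\n"
      · simp only [hl, if_pos]
        have h' : (counts ++ [((pvInterOf cur).length : Int)]).sum
            = ((groups ++ [cur]).map pvGroupCount).sum := by
          simp [List.sum_append, h, pvGroupCount_eq]
        have := ih (counts ++ [((pvInterOf cur).length : Int)]) (groups ++ [cur]) [] h'
        simpa [pvInterOf] using this
      · simp only [hl, if_neg, Bool.false_eq_true, not_false_eq_true]
        cases cur with
        | nil =>
            have := ih counts groups [PySem.Str.stripChars l "\n"] h
            simpa [pvInterOf, List.isEmpty] using this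
        | cons ch ct =>
            have := ih counts groups ((ch :: ct) ++ [PySem.Str.stripChars l "\n"]) h
            rw [pvInterOf_append] at this
            simpa [List.isEmpty, pvInter_ofList] using this

-- ===== VERDICT (by name: the statement is the Claim_ definition above) =====
theorem count_everyone_answered_yes_spec : Claim_equal_count_everyone_answered_yes := by
  intro lines _
  unfold Spec_count_everyone_answered_yes count_everyone_answered_yes count_everyone_answered_yes_alt
  have := pv_key lines [] [] [] rfl
  simpa [pvInterOf] using this
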